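-- pv_equiv track=rewrite | github.com/mini0-0/Practice_Programmers | python/체육대회_PCCP_121684_ver1.py | solution
-- ===== SOURCE A (Python) =====
-- from itertools import combinations, permutations
--
-- def solution(ability):
--     answer = 0
--     people, sports_size = len(ability), len(ability[0])
--     scores = [i for i in range(people)]
--     sports = [i for i in range(sports_size)]
--
--     for i in combinations(scores, sports_size):
--         for j in permutations(sports, sports_size):
--             power = 0
--             for k in range(len(j)): power += ability[i[k]][j[k]]
--             answer = max(power, answer)
--
--     return answer
-- ===== SOURCE B (Python) =====
-- def solution(ability):
--     m = len(ability[0])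
--     size = 1 << m
--     full = size - 1
--     # dp[mask] = best total using sports in mask, assigned to distinct people
--     # among the rows processed so far (processed back to front); None = impossible
--     dp = [0 if mask == 0 else None for mask in range(size)]
--     for row in reversed(ability):
--         ndp = dp[:]
--         for mask in range(size):
--             best = dp[mask]
--             for j in range(m):
--                 if (mask >> j) & 1:
--                     sub = dp[mask ^ (1 << j)]
--                     if sub is not None:
--                         cand = sub + row[j]
--                         if best is None or cand > best:
--                             best = cand
--             ndp[mask] = best
--         dp = ndp
--     t = dp[full]
--     return 0 if t is None or t < 0 else t
-- ===== Notes on version B (the rewrite author's own statement) =====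
-- stated objective: faster
-- what changed: Replaced A's brute-force enumeration of all C(n,m) people-combinations times m! sport-permutations with a bitmask dynamic program over sport subsets (assignment-problem DP), folding over the people once.
-- outside the precondition, e.g. on solution([[0, 0, 0], [0]]): A returns 0, B raises IndexError
import Mathlib
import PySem

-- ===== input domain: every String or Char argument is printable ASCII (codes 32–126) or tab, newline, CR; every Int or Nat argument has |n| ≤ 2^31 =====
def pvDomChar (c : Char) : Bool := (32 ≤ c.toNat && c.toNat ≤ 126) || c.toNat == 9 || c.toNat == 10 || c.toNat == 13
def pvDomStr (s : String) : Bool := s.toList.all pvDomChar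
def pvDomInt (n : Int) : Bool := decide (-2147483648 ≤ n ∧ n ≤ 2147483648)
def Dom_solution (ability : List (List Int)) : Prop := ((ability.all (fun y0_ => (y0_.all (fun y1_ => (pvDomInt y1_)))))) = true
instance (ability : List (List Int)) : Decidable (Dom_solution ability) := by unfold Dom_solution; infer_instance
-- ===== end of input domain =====

-- B replaces A's enumeration of all combinations×permutations by a bitmask DP over
-- sports masks (assignment-problem DP); equivalence of the returned value is proved on Pre_.

-- ===== PORT A =====
-- itertools.combinations(xs, k), in itertools' lexicographic emission order
def combosA : Nat → List Nat → List (List Nat)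
  | 0, _ => [[]]
  | _+1, [] => []
  | k+1, x :: xs => (combosA k xs).map (fun t => x :: t) ++ combosA (k+1) xs

-- itertools.permutations(xs, len(xs)), in itertools' index-selection order
def permsAux : Nat → List Nat → List (List Nat)
  | 0, _ => [[]]
  | f+1, xs => (List.range xs.length).flatMap
      (fun i => (permsAux f (xs.eraseIdx i)).map (fun t => xs.getD i 0 :: t))

def permsA (xs : List Nat) : List (List Nat) := permsAux xs.length xs

-- len(ability[0]) is ported as (ability.headD []).length and the in-range indexings
-- ability[i[k]][j[k]] as getD (exact on Pre_, which gives nonemptiness and row length ≥ m)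
def solution (ability : List (List Int)) : Int :=
  let people := ability.length
  let sports_size := (ability.headD []).length
  let scores := List.range people
  let sports := List.range sports_size
  (combosA sports_size scores).foldl (fun answer i =>
    (permsA sports).foldl (fun answer j =>
      let power := (List.range j.length).foldl
        (fun p k => p + ((ability.getD (i.getD k 0) []).getD (j.getD k 0) 0)) 0
      max power answer) answer) 0

-- ===== PORT B =====
-- dp[0] = 0, impossible masks = None  ('[0 if mask == 0 else None for mask in range(size)]')
def baseT (m : Nat) : List (Option Int) :=
  (List.range (1 <<< m)).map (fun mask => if mask = 0 then some (0 : Int) else none)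

-- one person processed: for every mask, keep dp[mask] or assign this person sport j ∈ mask
def stepRow (m : Nat) (row : List Int) (prev : List (Option Int)) : List (Option Int) :=
  (List.range (1 <<< m)).map (fun mask =>
    (List.range m).foldl (fun best j =>
      if Nat.testBit mask j then              -- (mask >> j) & 1
        match prev.getD (mask ^^^ (1 <<< j)) none with
        | none => best
        | some sub =>
          let cand := sub + row.getD j 0
          match best with
          | none => some cand
          | some b => if cand > b then some cand else some b
      else best) (prev.getD mask none))

def solution_alt (ability : List (List Int)) : Int :=
  let m := (ability.headD []).length          -- len(ability[0]); Pre_ excludes []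
  let dp := ability.foldr (stepRow m) (baseT m)   -- 'for row in reversed(ability)'
  match dp.getD (1 <<< m - 1) none with
  | none => 0
  | some t => if t < 0 then 0 else t

-- ===== PRECONDITION & SPEC =====
-- Pre_ excludes the inputs on which Python A raises (empty list, or a row shorter than
-- len(ability[0]) that some combination reaches); it also excludes ragged inputs with more
-- sports than people, where A returns 0 without ever indexing but B's row[j] raises.
def Pre_solution (ability : List (List Int)) : Prop :=
  ability ≠ [] ∧ ∀ row ∈ ability, (ability.headD []).length ≤ row.length

instance (ability : List (List Int)) : Decidable (Pre_solution ability) := by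
  unfold Pre_solution; infer_instance

def pvWitness_solution : List (List Int) := [[1, 2], [3, 4], [0, 5]]

def Spec_solution (ability : List (List Int)) (out : Int) : Prop := out = solution_alt ability
instance (ability : List (List Int)) (out : Int) : Decidable (Spec_solution ability out) := by unfold Spec_solution; infer_instance

-- ===== CLAIM (what is proved, stated in full; the proofs are below) =====
def Claim_equal_solution : Prop := ∀ (ability : List (List Int)), Dom_solution ability → Pre_solution ability → Spec_solution ability (solution ability)

-- ===== LEMMAS AND PROOFS =====

-- running maximum (A's 'answer = max(power, answer)' accumulator)
def lmax (a : Int) (l : List Int) : Int := l.foldl (fun acc v => max v acc) a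

def oMax : Option Int → Option Int → Option Int
  | none, b => b
  | some a, none => some a
  | some a, some b => some (max a b)

def oMaxList : List Int → Option Int
  | [] => none
  | x :: t => some (lmax x t)

-- all achievable totals assigning the sports in `mask` to distinct rows of `rs`
def selM (m : Nat) : List (List Int) → Nat → List Int
  | [], mask => if mask = 0 then [0] else []
  | r :: rs, mask =>
      selM m rs mask ++ (List.range m).flatMap (fun j =>
        if Nat.testBit mask j then (selM m rs (mask ^^^ (1 <<< j))).map (· + r.getD j 0) else [])

def zipSum : List (List Int) → List Nat → Int
  | r :: rs, j :: js => r.getD j 0 + zipSum rs js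
  | _, _ => 0

def rowsOf (ability : List (List Int)) (i : List Nat) : List (List Int) :=
  i.map (fun t => ability.getD t [])

-- "x is the total of some assignment of the sports in mask to distinct rows of rs"
def Good (_m : Nat) (rs : List (List Int)) (mask : Nat) (x : Int) : Prop :=
  ∃ rows js, rows.Sublist rs ∧ js.Nodup ∧ (∀ b, (b ∈ js) ↔ mask.testBit b = true) ∧
    rows.length = js.length ∧ zipSum rows js = x

def powerA (ability : List (List Int)) (i j : List Nat) : Int :=
  (List.range j.length).foldl
    (fun p k => p + ((ability.getD (i.getD k 0) []).getD (j.getD k 0) 0)) 0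

def powersL (ability : List (List Int)) : List Int :=
  (combosA (ability.headD []).length (List.range ability.length)).flatMap
    (fun i => (permsA (List.range (ability.headD []).length)).map (fun j => powerA ability i j))

theorem lmax_cons (a x : Int) (l : List Int) : lmax a (x :: l) = lmax (max x a) l := rfl

theorem lmax_append (a : Int) (l1 l2 : List Int) :
    lmax a (l1 ++ l2) = lmax (lmax a l1) l2 := by
  simp [lmax, List.foldl_append]

theorem le_lmax (a : Int) (l : List Int) : a ≤ lmax a l := by
  induction l generalizing a with
  | nil => simp [lmax]
  | cons x t ih => exact le_trans (le_max_right x a) (ih (max x a))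

theorem lmax_mem_le {x : Int} {l : List Int} (a : Int) (hx : x ∈ l) : x ≤ lmax a l := by
  induction l generalizing a with
  | nil => cases hx
  | cons y t ih =>
    rcases List.mem_cons.1 hx with rfl | h
    · exact le_trans (le_max_left x a) (le_lmax _ t)
    · exact ih (max y a) h

theorem lmax_cases (a : Int) (l : List Int) : lmax a l = a ∨ lmax a l ∈ l := by
  induction l generalizing a with
  | nil => left; rfl
  | cons x t ih =>
    rcases ih (max x a) with h | h
    · rw [lmax_cons, h]
      rcases max_choice x a with h' | h'
      · right; rw [h']; exact List.mem_cons_self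
      · left; exact h'
    · right; exact List.mem_cons_of_mem _ h

theorem lmax_init_max (l : List Int) : ∀ a b : Int, lmax (max a b) l = max a (lmax b l) := by
  induction l with
  | nil => intro a b; rfl
  | cons x t ih =>
    intro a b
    rw [lmax_cons, max_left_comm x a b, ih, lmax_cons]

theorem lmax_out (a x : Int) (l : List Int) : lmax a (x :: l) = max a (lmax x l) := by
  rw [lmax_cons, max_comm x a, lmax_init_max]

theorem lmax_map_add (a c : Int) (l : List Int) :
    lmax (a + c) (l.map (· + c)) = lmax a l + c := by
  induction l generalizing a with
  | nil => rfl
  | cons x t ih =>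
    simp only [List.map_cons, lmax_cons]
    rw [show max (x + c) (a + c) = max x a + c from max_add_add_right x a c, ih]

theorem oMax_none_right (a : Option Int) : oMax a none = a := by cases a <;> rfl

theorem oMaxList_append (l1 l2 : List Int) :
    oMaxList (l1 ++ l2) = oMax (oMaxList l1) (oMaxList l2) := by
  cases l1 with
  | nil => simp [oMaxList, oMax]
  | cons x t =>
    cases l2 with
    | nil => simp [oMaxList, oMax_none_right]
    | cons y s =>
      show some (lmax x (t ++ y :: s)) = some (max (lmax x t) (lmax y s))
      rw [lmax_append, lmax_out]

theorem oMaxList_map_add (c : Int) (l : List Int) :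
    oMaxList (l.map (· + c)) = (oMaxList l).map (· + c) := by
  cases l with
  | nil => rfl
  | cons x t =>
    show some (lmax (x + c) (t.map (· + c))) = some (lmax x t + c)
    rw [lmax_map_add]

theorem oMaxList_eq_none {l : List Int} : oMaxList l = none ↔ l = [] := by
  cases l <;> simp [oMaxList]

theorem oMaxList_some_mem {l : List Int} {v : Int} (h : oMaxList l = some v) : v ∈ l := by
  cases l with
  | nil => cases h
  | cons x t =>
    have hv : v = lmax x t := by cases h; rfl
    rcases lmax_cases x t with h' | h'
    · subst hv; rw [h']; exact List.mem_cons_self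
    · subst hv; exact List.mem_cons_of_mem _ h'

theorem oMaxList_le {l : List Int} {v x : Int} (h : oMaxList l = some v) (hx : x ∈ l) : x ≤ v := by
  cases l with
  | nil => cases hx
  | cons y t =>
    have hv : v = lmax y t := by cases h; rfl
    subst hv
    rcases List.mem_cons.1 hx with rfl | h'
    · exact le_lmax _ _
    · exact lmax_mem_le _ h'

theorem two_pow_shift (j : Nat) : (1 : Nat) <<< j = 2 ^ j := by
  rw [Nat.shiftLeft_eq, one_mul]

theorem testBit_lt {mask m b : Nat} (hm : mask < 2 ^ m) (hb : mask.testBit b = true) : b < m := by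
  by_contra h
  have : mask < 2 ^ b := lt_of_lt_of_le hm (Nat.pow_le_pow_right (by norm_num) (Nat.le_of_not_lt h))
  rw [Nat.testBit_lt_two_pow this] at hb
  cases hb

theorem getD_map_range {α : Type} (f : Nat → α) (d : α) {N i : Nat} (h : i < N) :
    (((List.range N).map f).getD i d) = f i := by
  rw [List.getD_eq_getElem _ _ (by simpa using h)]
  simp

theorem foldl_ext_mem {α β : Type} (f g : β → α → β) (l : List α)
    (h : ∀ b a, a ∈ l → f b a = g b a) : ∀ b, l.foldl f b = l.foldl g b := by
  induction l with
  | nil => intro b; rfl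
  | cons x t ih =>
    intro b
    show t.foldl f (f b x) = t.foldl g (g b x)
    rw [h b x List.mem_cons_self]
    exact ih (fun b a ha => h b a (List.mem_cons_of_mem _ ha)) _

theorem foldl_oMax (g : Nat → List Int) (js : List Nat) : ∀ (l : List Int),
    js.foldl (fun best j => oMax best (oMaxList (g j))) (oMaxList l) = oMaxList (l ++ js.flatMap g) := by
  induction js with
  | nil => intro l; simp
  | cons j js ih =>
    intro l
    show js.foldl _ (oMax (oMaxList l) (oMaxList (g j))) = _
    rw [← oMaxList_append, ih (l ++ g j)]
    simp [List.append_assoc]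

theorem stepRow_getD (m : Nat) (row : List Int) (prev : List (Option Int)) (mask : Nat)
    (hm : mask < 2 ^ m) :
    (stepRow m row prev).getD mask none =
      (List.range m).foldl (fun best j =>
        if Nat.testBit mask j then
          match prev.getD (mask ^^^ (1 <<< j)) none with
          | none => best
          | some sub =>
            let cand := sub + row.getD j 0
            match best with
            | none => some cand
            | some b => if cand > b then some cand else some b
        else best) (prev.getD mask none) := by
  unfold stepRow
  rw [getD_map_range _ _ (by rwa [two_pow_shift])]

-- B's dp table after folding rows rs computes the maximum of selM
theorem table_eq (m : Nat) (rs : List (List Int)) :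
    ∀ mask, mask < 2 ^ m →
      ((rs.foldr (stepRow m) (baseT m)).getD mask none) = oMaxList (selM m rs mask) := by
  induction rs with
  | nil =>
    intro mask hm
    show (baseT m).getD mask none = _
    unfold baseT
    rw [getD_map_range _ _ (by rwa [two_pow_shift])]
    by_cases h : mask = 0 <;> simp [selM, h, oMaxList, lmax]
  | cons r rs ih =>
    intro mask hm
    show (stepRow m r (rs.foldr (stepRow m) (baseT m))).getD mask none = _
    rw [stepRow_getD m r _ mask hm]
    rw [ih mask hm]
    rw [foldl_ext_mem _
      (fun best j => oMax best (oMaxList (if Nat.testBit mask j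
        then (selM m rs (mask ^^^ (1 <<< j))).map (· + r.getD j 0) else [])))
      (List.range m) ?_ (oMaxList (selM m rs mask))]
    · rw [foldl_oMax]
      rfl
    · intro best j hj
      have hjm : j < m := List.mem_range.1 hj
      by_cases hb : Nat.testBit mask j
      · have hsub : mask ^^^ 1 <<< j < 2 ^ m := by
          rw [two_pow_shift]
          exact Nat.xor_lt_two_pow hm (Nat.pow_lt_pow_right (by norm_num) hjm)
        simp only [hb, if_true, ih _ hsub]
        cases hs : oMaxList (selM m rs (mask ^^^ 1 <<< j)) with
        | none =>
          have : oMaxList ((selM m rs (mask ^^^ 1 <<< j)).map (· + r.getD j 0)) = none := by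
            rw [oMaxList_map_add, hs]; rfl
          rw [this, oMax_none_right]
        | some sub =>
          have : oMaxList ((selM m rs (mask ^^^ 1 <<< j)).map (· + r.getD j 0))
              = some (sub + r.getD j 0) := by
            rw [oMaxList_map_add, hs]; rfl
          rw [this]
          cases best with
          | none => rfl
          | some b =>
            show (if sub + r.getD j 0 > b then some (sub + r.getD j 0) else some b)
                = some (max b (sub + r.getD j 0))
            by_cases hc : sub + r.getD j 0 > b
            · rw [if_pos hc, max_eq_right hc.le]
            · rw [if_neg hc, max_eq_left (not_lt.1 hc)]
      · simp [hb, oMaxList, oMax_none_right]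

theorem testBit_xor_bit (mask j b : Nat) (hb : mask.testBit j = true) :
    (mask ^^^ 1 <<< j).testBit b = if b = j then false else mask.testBit b := by
  rw [Nat.testBit_xor, two_pow_shift, Nat.testBit_two_pow]
  by_cases hbj : b = j
  · subst hbj; simp [hb]
  · simp [hbj, Ne.symm hbj]

-- selM membership characterisation
theorem mem_selM (m : Nat) (rs : List (List Int)) :
    ∀ mask, mask < 2 ^ m → ∀ x, x ∈ selM m rs mask ↔ Good m rs mask x := by
  induction rs with
  | nil =>
    intro mask hm x
    by_cases h : mask = 0
    · subst h
      have hsel : selM m [] 0 = [0] := by simp [selM]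
      rw [hsel, List.mem_singleton]
      constructor
      · rintro rfl
        exact ⟨[], [], List.Sublist.refl _, List.nodup_nil, by simp [Nat.zero_testBit], rfl, rfl⟩
      · rintro ⟨rows, js, hsub, _, _, hlen, hsum⟩
        have hr : rows = [] := List.sublist_nil.1 hsub
        subst hr
        have hj : js = [] := List.length_eq_zero_iff.1 hlen.symm
        subst hj
        simpa [zipSum] using hsum.symm
    · have hsel : selM m [] mask = [] := by simp [selM, h]
      rw [hsel]
      simp only [List.not_mem_nil, false_iff]
      rintro ⟨rows, js, hsub, _, hbits, hlen, _⟩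
      apply h
      have hr : rows = [] := List.sublist_nil.1 hsub
      subst hr
      have hj : js = [] := List.length_eq_zero_iff.1 hlen.symm
      subst hj
      apply Nat.eq_of_testBit_eq
      intro i
      rw [Nat.zero_testBit]
      have := hbits i
      simp only [List.not_mem_nil, false_iff] at this
      simpa using this
  | cons r rs ih =>
    intro mask hm x
    constructor
    · intro hx
      rcases List.mem_append.1 hx with hx | hx
      · rcases ((ih mask hm x).1 hx) with ⟨rows, js, hsub, hnd, hbits, hlen, hsum⟩
        exact ⟨rows, js, hsub.cons _, hnd, hbits, hlen, hsum⟩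
      · rcases List.mem_flatMap.1 hx with ⟨j, hj, hxj⟩
        have hjm : j < m := List.mem_range.1 hj
        by_cases hb : Nat.testBit mask j
        · rw [if_pos hb] at hxj
          rcases List.mem_map.1 hxj with ⟨y, hy, rfl⟩
          have hsubm : mask ^^^ 1 <<< j < 2 ^ m := by
            rw [two_pow_shift]
            exact Nat.xor_lt_two_pow hm (Nat.pow_lt_pow_right (by norm_num) hjm)
          rcases (ih _ hsubm y).1 hy with ⟨rows, js, hsubl, hnd, hbits, hlen, hsum⟩
          refine ⟨r :: rows, j :: js, hsubl.cons₂ r, ?_, ?_, by simp [hlen], ?_⟩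
          · refine List.nodup_cons.2 ⟨fun hmem => ?_, hnd⟩
            have := (hbits j).1 hmem
            rw [testBit_xor_bit mask j j hb, if_pos rfl] at this
            cases this
          · intro b
            rw [List.mem_cons]
            by_cases hbj : b = j
            · subst hbj; simp [hb]
            · rw [hbits b, testBit_xor_bit mask j b hb, if_neg hbj]
              simp [hbj]
          · show r.getD j 0 + zipSum rows js = y + r.getD j 0
            rw [hsum, add_comm]
        · rw [if_neg hb] at hxj
          cases hxj
    · rintro ⟨rows, js, hsub, hnd, hbits, hlen, hsum⟩
      rcases List.sublist_cons_iff.1 hsub with hsub1 | ⟨rows', rfl, hsub2⟩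
      · exact List.mem_append.2 (Or.inl ((ih mask hm x).2 ⟨rows, js, hsub1, hnd, hbits, hlen, hsum⟩))
      · cases js with
        | nil => simp at hlen
        | cons j js' =>
          have hbj : mask.testBit j = true := (hbits j).1 List.mem_cons_self
          have hjm : j < m := testBit_lt hm hbj
          have hsubm : mask ^^^ 1 <<< j < 2 ^ m := by
            rw [two_pow_shift]
            exact Nat.xor_lt_two_pow hm (Nat.pow_lt_pow_right (by norm_num) hjm)
          have hnotin : j ∉ js' := (List.nodup_cons.1 hnd).1
          have hbits' : ∀ b, (b ∈ js') ↔ (mask ^^^ 1 <<< j).testBit b = true := by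
            intro b
            rw [testBit_xor_bit mask j b hbj]
            by_cases hbj' : b = j
            · subst hbj'
              simp [hnotin]
            · rw [if_neg hbj', ← hbits b, List.mem_cons]
              simp [hbj']
          have hx' : zipSum rows' js' ∈ selM m rs (mask ^^^ 1 <<< j) :=
            (ih _ hsubm _).2 ⟨rows', js', hsub2, (List.nodup_cons.1 hnd).2, hbits', by simpa using hlen, rfl⟩
          refine List.mem_append.2 (Or.inr (List.mem_flatMap.2 ⟨j, List.mem_range.2 hjm, ?_⟩))
          rw [if_pos hbj]
          refine List.mem_map.2 ⟨zipSum rows' js', hx', ?_⟩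
          rw [← hsum]
          show zipSum rows' js' + r.getD j 0 = r.getD j 0 + zipSum rows' js'
          rw [add_comm]

-- combinations = sublists of the given length
theorem mem_combosA (xs : List Nat) : ∀ k l, l ∈ combosA k xs ↔ l.Sublist xs ∧ l.length = k := by
  induction xs with
  | nil =>
    intro k l
    cases k with
    | zero => simp [combosA, List.sublist_nil, List.length_eq_zero_iff]
    | succ k =>
      simp only [combosA, List.not_mem_nil, false_iff, not_and]
      intro hs
      rw [List.sublist_nil.1 hs]
      simp
  | cons x xs ih =>
    intro k l
    cases k with
    | zero =>
      simp only [combosA, List.mem_singleton, List.length_eq_zero_iff]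
      exact ⟨fun h => ⟨h ▸ List.nil_sublist _, h⟩, fun h => h.2⟩
    | succ k =>
      constructor
      · intro h
        rcases List.mem_append.1 h with h | h
        · rcases List.mem_map.1 h with ⟨t, ht, rfl⟩
          rcases (ih k t).1 ht with ⟨hs, hl⟩
          exact ⟨List.sublist_cons_iff.2 (Or.inr ⟨t, rfl, hs⟩), by simp [hl]⟩
        · rcases (ih (k+1) l).1 h with ⟨hs, hl⟩
          exact ⟨List.sublist_cons_iff.2 (Or.inl hs), hl⟩
      · rintro ⟨hs, hl⟩
        rcases List.sublist_cons_iff.1 hs with hs1 | ⟨t, rfl, hs2⟩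
        · exact List.mem_append.2 (Or.inr ((ih (k+1) l).2 ⟨hs1, hl⟩))
        · exact List.mem_append.2 (Or.inl (List.mem_map.2 ⟨t, (ih k t).2 ⟨hs2, by simpa using hl⟩, rfl⟩))

-- permutations = permutations
theorem mem_permsAux : ∀ (f : Nat) (xs l : List Nat), xs.length = f →
    (l ∈ permsAux f xs ↔ l.Perm xs) := by
  intro f
  induction f with
  | zero =>
    intro xs l h
    rw [List.length_eq_zero_iff.1 h]
    simp [permsAux, List.perm_nil]
  | succ f ih =>
    intro xs l h
    simp only [permsAux, List.mem_flatMap, List.mem_map, List.mem_range]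
    constructor
    · rintro ⟨i, hi, t, ht, rfl⟩
      have hi' : i < xs.length := by omega
      have hlen : (xs.eraseIdx i).length = f := by
        rw [List.length_eraseIdx, if_pos hi']
        omega
      have ht' := (ih _ t hlen).1 ht
      rw [List.getD_eq_getElem _ _ hi']
      exact (ht'.cons xs[i]).trans (List.getElem_cons_eraseIdx_perm hi')
    · intro hp
      cases l with
      | nil =>
        exfalso
        have := hp.length_eq
        rw [h] at this
        simp at this
      | cons a t =>
        have ha : a ∈ xs := hp.subset List.mem_cons_self
        obtain ⟨i, hi, hx⟩ := List.mem_iff_getElem.1 ha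
        have hlen : (xs.eraseIdx i).length = f := by
          rw [List.length_eraseIdx, if_pos hi]
          omega
        refine ⟨i, by omega, t, ?_, ?_⟩
        · apply (ih _ t hlen).2
          have h2 : (a :: t).Perm (a :: xs.eraseIdx i) := by
            refine hp.trans ?_
            have := (List.getElem_cons_eraseIdx_perm hi).symm
            rwa [hx] at this
          exact h2.cons_inv
        · rw [List.getD_eq_getElem _ _ hi, hx]

theorem mem_permsA (xs l : List Nat) : l ∈ permsA xs ↔ l.Perm xs :=
  mem_permsAux xs.length xs l rfl

theorem map_getD_range (ability : List (List Int)) :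
    (List.range ability.length).map (fun t => ability.getD t []) = ability := by
  apply List.ext_getElem
  · simp
  · intro i h1 h2
    simp only [List.getElem_map, List.getElem_range]
    rw [List.getD_eq_getElem _ _ (by simpa using h2)]

theorem foldl_add_f (f : Nat → Int) (l : List Nat) :
    ∀ a : Int, l.foldl (fun p k => p + f k) a = a + (l.map f).sum := by
  induction l with
  | nil => intro a; simp
  | cons x t ih =>
    intro a
    show t.foldl _ (a + f x) = _
    rw [ih, List.map_cons, List.sum_cons, add_assoc]

theorem powerA_eq_zipSum (ability : List (List Int)) :
    ∀ (j i : List Nat), i.length = j.length →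
      powerA ability i j = zipSum (rowsOf ability i) j := by
  intro j
  induction j with
  | nil =>
    intro i h
    have : i = [] := List.length_eq_zero_iff.1 h
    subst this
    rfl
  | cons j0 js ihj =>
    intro i h
    cases i with
    | nil => simp at h
    | cons i0 is =>
      unfold powerA
      rw [foldl_add_f, zero_add, List.length_cons, List.range_succ_eq_map,
        List.map_cons, List.sum_cons, List.map_map]
      have htail :
          ((List.range js.length).map
            ((fun k => ((ability.getD ((i0 :: is).getD k 0) []).getD ((j0 :: js).getD k 0) 0)) ∘ Nat.succ)).sum
          = zipSum (rowsOf ability is) js := by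
        have hrec := ihj is (by simpa using h)
        unfold powerA at hrec
        rw [foldl_add_f, zero_add] at hrec
        rw [← hrec]
        congr 1
      rw [htail]
      rfl

-- A's enumerated powers have exactly the Good totals at the full mask
theorem mem_powersL (ability : List (List Int)) (x : Int) :
    x ∈ powersL ability ↔ Good (ability.headD []).length ability (2 ^ (ability.headD []).length - 1) x := by
  unfold powersL
  constructor
  · intro hx
    rcases List.mem_flatMap.1 hx with ⟨i, hi, hx2⟩
    rcases List.mem_map.1 hx2 with ⟨j, hj, rfl⟩
    rcases (mem_combosA _ _ _).1 hi with ⟨hsub, hleni⟩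
    have hpj : j.Perm (List.range (ability.headD []).length) := (mem_permsA _ _).1 hj
    have hlj : j.length = (ability.headD []).length := by
      rw [hpj.length_eq, List.length_range]
    refine ⟨rowsOf ability i, j, ?_, ?_, ?_, ?_, ?_⟩
    · have := hsub.map (fun t => ability.getD t [])
      rwa [map_getD_range] at this
    · exact hpj.nodup_iff.2 List.nodup_range
    · intro b
      rw [hpj.mem_iff, List.mem_range, Nat.testBit_two_pow_sub_one]
      simp
    · rw [rowsOf, List.length_map, hleni, hlj]
    · exact (powerA_eq_zipSum ability j i (by rw [hleni, hlj])).symm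
  · rintro ⟨rows, js, hsub, hnd, hbits, hlen, hsum⟩
    have hjperm : js.Perm (List.range (ability.headD []).length) := by
      have h1 : js.Subperm (List.range (ability.headD []).length) := by
        refine hnd.subperm (fun b hb => List.mem_range.2 ?_)
        have := (hbits b).1 hb
        rw [Nat.testBit_two_pow_sub_one] at this
        exact of_decide_eq_true this
      have h2 : (List.range (ability.headD []).length).Subperm js := by
        refine List.nodup_range.subperm (fun b hb => (hbits b).2 ?_)
        rw [Nat.testBit_two_pow_sub_one]
        exact decide_eq_true (List.mem_range.1 hb)
      exact h1.antisymm h2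
    have hsub' : rows.Sublist ((List.range ability.length).map (fun t => ability.getD t [])) := by
      rwa [map_getD_range ability]
    obtain ⟨i, hisub, hieq⟩ := List.sublist_map_iff.1 hsub'
    have hleni : i.length = js.length := by
      have : i.length = rows.length := by rw [hieq, List.length_map]
      rw [this, hlen]
    refine List.mem_flatMap.2 ⟨i, (mem_combosA _ _ _).2 ⟨hisub, ?_⟩,
      List.mem_map.2 ⟨js, (mem_permsA _ _).2 hjperm, ?_⟩⟩
    · rw [hleni, hjperm.length_eq, List.length_range]
    · rw [powerA_eq_zipSum ability js i hleni, rowsOf, ← hieq, hsum]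

theorem foldl_lmax_flat (F : List Nat → List Int) (L1 : List (List Nat)) :
    ∀ a : Int, L1.foldl (fun acc i => lmax acc (F i)) a = lmax a (L1.flatMap F) := by
  induction L1 with
  | nil => intro a; rfl
  | cons i L ih =>
    intro a
    show L.foldl _ (lmax a (F i)) = _
    rw [ih, List.flatMap_cons, lmax_append]

-- A's nested folds flatten to a running maximum over powersL
theorem solution_eq_lmax (ability : List (List Int)) :
    solution ability = lmax 0 (powersL ability) := by
  show (combosA (ability.headD []).length (List.range ability.length)).foldl
      (fun answer i => (permsA (List.range (ability.headD []).length)).foldl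
        (fun answer j => max ((List.range j.length).foldl
          (fun p k => p + ((ability.getD (i.getD k 0) []).getD (j.getD k 0) 0)) 0) answer) answer) 0
    = lmax 0 (powersL ability)
  have hinner : (fun (answer : Int) (i : List Nat) =>
      (permsA (List.range (ability.headD []).length)).foldl
        (fun answer j => max ((List.range j.length).foldl
          (fun p k => p + ((ability.getD (i.getD k 0) []).getD (j.getD k 0) 0)) 0) answer) answer)
      = fun (answer : Int) (i : List Nat) =>
        lmax answer ((permsA (List.range (ability.headD []).length)).map (powerA ability i)) := by
    funext a i
    rw [lmax, List.foldl_map]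
    rfl
  rw [hinner, foldl_lmax_flat]
  rfl

-- ===== VERDICT (by name: the statement is the Claim_ definition above) =====
theorem solution_spec : Claim_equal_solution := by
  intro ability _ _
  unfold Spec_solution
  have hm : (2 ^ (ability.headD []).length - 1) < 2 ^ (ability.headD []).length :=
    Nat.sub_lt (Nat.two_pow_pos _) (by norm_num)
  have hmem : ∀ y : Int, y ∈ powersL ability ↔
      y ∈ selM (ability.headD []).length ability (2 ^ (ability.headD []).length - 1) := by
    intro y
    rw [mem_powersL, mem_selM _ _ _ hm]
  rw [solution_eq_lmax]
  have halt : solution_alt ability =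
      match (ability.foldr (stepRow (ability.headD []).length)
          (baseT (ability.headD []).length)).getD (1 <<< (ability.headD []).length - 1) none with
      | none => 0
      | some t => if t < 0 then 0 else t := rfl
  rw [halt]
  have hidx : (1 <<< (ability.headD []).length) - 1 = 2 ^ (ability.headD []).length - 1 := by
    rw [two_pow_shift]
  rw [hidx, table_eq _ _ _ hm]
  cases hsel : oMaxList (selM (ability.headD []).length ability
      (2 ^ (ability.headD []).length - 1)) with
  | none =>
    have hempty : selM (ability.headD []).length ability (2 ^ (ability.headD []).length - 1) = [] :=
      oMaxList_eq_none.1 hsel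
    have hpow : powersL ability = [] := by
      apply List.eq_nil_iff_forall_not_mem.2
      intro y hy
      have := (hmem y).1 hy
      rw [hempty] at this
      exact List.not_mem_nil this
    rw [hpow]
    rfl
  | some v =>
    have hvp : v ∈ powersL ability := (hmem v).2 (oMaxList_some_mem hsel)
    have hle1 : lmax 0 (powersL ability) ≤ max 0 v := by
      rcases lmax_cases 0 (powersL ability) with h | h
      · rw [h]; exact le_max_left 0 v
      · exact le_trans (oMaxList_le hsel ((hmem _).1 h)) (le_max_right 0 v)
    have hle2 : max 0 v ≤ lmax 0 (powersL ability) :=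
      max_le (le_lmax 0 _) (lmax_mem_le 0 hvp)
    rw [le_antisymm hle1 hle2]
    show max 0 v = if v < 0 then 0 else v
    by_cases hvneg : v < 0
    · rw [if_pos hvneg, max_eq_left hvneg.le]
    · rw [if_neg hvneg, max_eq_right (not_lt.1 hvneg)]
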